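-- pv_equiv track=rewrite | github.com/kdh12345/AlgorithmStudy | 프로그래머스/3/12938. 최고의 집합/최고의 집합.py | solution
-- ===== SOURCE A (Python) =====
-- def solution(n, s):
--     answer = []
--     if n > s:
--         return [-1]
--     number = s//n
--     mod = s%n
--
--     for i in range(n):
--         answer.append(number)
--     if mod != 0:
--         for i in range(len(answer)):
--             answer[i] += 1
--             mod -= 1
--             if mod == 0:
--                 break
--     answer.sort()
--     return answer
-- ===== SOURCE B (Python) =====
-- def solution(n, s):
--     if n > s:
--         return [-1]
--     out = []
--     while n > 0:
--         x = -(-s // n)        # the largest element must be ceil(s/n); take it and recurse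
--         out.append(x)
--         s -= x
--         n -= 1
--     out.reverse()
--     return out
-- ===== Notes on version B (the rewrite author's own statement) =====
-- stated objective: alternative
-- what changed: B is a greedy loop: it repeatedly takes the largest element of the best set, ceil(s/n) of the remaining sum, subtracts it and decrements n, reversing the collected descending list at the end — no bulk fill, no increment-with-break pass, no sort; it trades A's O(n log n) sort for an O(n) Python-level loop of similar measured cost.
import Mathlib
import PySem

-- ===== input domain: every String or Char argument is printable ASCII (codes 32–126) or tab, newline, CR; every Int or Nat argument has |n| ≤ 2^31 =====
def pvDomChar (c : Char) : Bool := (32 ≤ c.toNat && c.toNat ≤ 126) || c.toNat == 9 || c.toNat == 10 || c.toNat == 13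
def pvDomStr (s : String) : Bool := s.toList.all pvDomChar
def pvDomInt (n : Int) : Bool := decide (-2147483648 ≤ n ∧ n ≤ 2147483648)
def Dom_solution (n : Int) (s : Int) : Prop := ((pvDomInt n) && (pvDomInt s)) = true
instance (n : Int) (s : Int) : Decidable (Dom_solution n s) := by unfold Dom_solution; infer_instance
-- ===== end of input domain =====

-- B replaces A's fill-then-increment-then-sort by a greedy loop that repeatedly takes the
-- largest element ceil(s/n) of the remaining sum and reverses at the end (alternative algorithm).

-- ===== PORT A =====
-- the 'for i in range(len(answer)): answer[i] += 1; mod -= 1; if mod == 0: break' loop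
def solutionIncLoop : List Int → Int → List Int
  | [], _ => []
  | x :: xs, m => (x + 1) :: (if m - 1 = 0 then xs else solutionIncLoop xs (m - 1))

def solution (n : Int) (s : Int) : List Int :=
  if n > s then [-1]
  else
    let number := PySem.Int.floordiv s n
    let mod := PySem.Int.mod s n
    let answer := (PySem.List.pyRange 0 n 1).foldl (fun acc _ => acc ++ [number]) []
    let answer2 := if mod ≠ 0 then solutionIncLoop answer mod else answer
    PySem.List.sorted answer2 (fun x => x) false

-- ===== PORT B =====
-- the 'while n > 0: x = -(-s // n); out.append(x); s -= x; n -= 1' loop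
def solutionGreedyLoop (n : Int) (s : Int) (out : List Int) : List Int :=
  if 0 < n then
    let x := -(PySem.Int.floordiv (-s) n)
    solutionGreedyLoop (n - 1) (s - x) (out ++ [x])
  else out
termination_by n.toNat
decreasing_by omega

def solution_alt (n : Int) (s : Int) : List Int :=
  if n > s then [-1]
  else (solutionGreedyLoop n s []).reverse

-- ===== PRECONDITION & SPEC =====
-- Pre_ excludes exactly n = 0 with s ≥ 0, where A raises ZeroDivisionError on s // 0.
def Pre_solution (n : Int) (s : Int) : Prop := n ≠ 0 ∨ s < 0
instance (n : Int) (s : Int) : Decidable (Pre_solution n s) := by unfold Pre_solution; infer_instance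
def pvWitness_solution : Int × Int := (3, 8)

def Spec_solution (n : Int) (s : Int) (out : List Int) : Prop := out = solution_alt n s
instance (n : Int) (s : Int) (out : List Int) : Decidable (Spec_solution n s out) := by unfold Spec_solution; infer_instance

-- ===== CLAIM (what is proved, stated in full; the proofs are below) =====
def Claim_equal_solution : Prop := ∀ (n : Int) (s : Int), Dom_solution n s → Pre_solution n s → Spec_solution n s (solution n s)

-- ===== LEMMAS AND PROOFS =====

theorem foldl_append_const (l : List Int) (c : Int) (init : List Int) :
    l.foldl (fun acc _ => acc ++ [c]) init = init ++ List.replicate l.length c := by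
  induction l generalizing init with
  | nil => simp
  | cons x xs ih =>
      simp [List.foldl, ih, List.replicate_succ]

theorem incLoop_replicate (k : Nat) (m q : Int) (h1 : 0 < m) (h2 : m.toNat ≤ k) :
    solutionIncLoop (List.replicate k q) m
      = List.replicate m.toNat (q + 1) ++ List.replicate (k - m.toNat) q := by
  induction k generalizing m with
  | zero => omega
  | succ j ih =>
      rw [List.replicate_succ, solutionIncLoop]
      by_cases hm : m - 1 = 0
      · have : m = 1 := by omega
        subst this
        simp
      · have hm1 : 0 < m - 1 := by omega
        have hm2 : (m - 1).toNat ≤ j := by omega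
        rw [if_neg hm, ih (m - 1) hm1 hm2]
        have hmt : m.toNat = (m - 1).toNat + 1 := by omega
        rw [hmt, List.replicate_succ]
        simp [Nat.succ_sub_succ]

theorem pairwise_le_rep_rep (a b : Nat) (q : Int) :
    (List.replicate a q ++ List.replicate b (q + 1)).Pairwise (fun x y => x ≤ y) := by
  rw [List.pairwise_append]
  refine ⟨List.pairwise_replicate.mpr (Or.inr le_rfl),
          List.pairwise_replicate.mpr (Or.inr le_rfl), ?_⟩
  intro x hx y hy
  rw [List.eq_of_mem_replicate hx, List.eq_of_mem_replicate hy]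
  omega

-- A's result equals the canonical sorted form (n > 0, n ≤ s)
theorem solution_canon (n s : Int) (hpos : 0 < n) (hns : ¬ n > s) :
    solution n s
      = List.replicate (n - PySem.Int.mod s n).toNat (PySem.Int.floordiv s n)
        ++ List.replicate (PySem.Int.mod s n).toNat (PySem.Int.floordiv s n + 1) := by
  unfold solution
  simp only [if_neg hns]
  rw [foldl_append_const, PySem.List.length_pyRange_one, List.nil_append]
  have hm0 : 0 ≤ PySem.Int.mod s n := PySem.Int.mod_nonneg s hpos
  have hmlt : PySem.Int.mod s n < n := PySem.Int.mod_lt s hpos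
  by_cases hmz : PySem.Int.mod s n = 0
  · rw [if_neg (by simp [hmz]), hmz]
    simp only [Int.sub_zero, Int.toNat_zero, List.replicate_zero, List.append_nil]
    exact PySem.List.sorted_eq_self_of_pairwise _ _
      (List.pairwise_replicate.mpr (Or.inr le_rfl))
  · rw [if_pos hmz,
      incLoop_replicate _ (PySem.Int.mod s n) (PySem.Int.floordiv s n)
        (by omega) (by omega)]
    have hk : (n - 0).toNat - (PySem.Int.mod s n).toNat
        = (n - PySem.Int.mod s n).toNat := by omega
    rw [hk]
    exact PySem.List.sorted_id_eq_of_perm_of_pairwise _ _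
      List.perm_append_comm (pairwise_le_rep_rep _ _ _)

-- B's loop produces, after the accumulator, the canonical DESCENDING list
theorem greedyLoop_nonpos (n s : Int) (acc : List Int) (h : n ≤ 0) :
    solutionGreedyLoop n s acc = acc := by
  rw [solutionGreedyLoop, if_neg (by omega)]

theorem greedyLoop_desc (k : Nat) : ∀ (n s : Int) (acc : List Int), n.toNat = k → 0 < n →
    solutionGreedyLoop n s acc
      = acc ++ (List.replicate (PySem.Int.mod s n).toNat (PySem.Int.floordiv s n + 1)
         ++ List.replicate (n - PySem.Int.mod s n).toNat (PySem.Int.floordiv s n)) := by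
  induction k with
  | zero => intro n s acc hk hpos; omega
  | succ j ih =>
      intro n s acc hk hpos
      have hq := PySem.Int.floordiv_mul_add_mod s n
      have hm0 : 0 ≤ PySem.Int.mod s n := PySem.Int.mod_nonneg s hpos
      have hmlt : PySem.Int.mod s n < n := PySem.Int.mod_lt s hpos
      set q := PySem.Int.floordiv s n with hqdef
      set m := PySem.Int.mod s n with hmdef
      rw [solutionGreedyLoop, if_pos hpos]
      by_cases hmz : m = 0
      · -- x = q ; remaining sum (n-1)*q
        have hx : -(PySem.Int.floordiv (-s) n) = q := by
          rw [PySem.Int.neg_floordiv_neg_eq_iff_of_pos hpos]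
          constructor <;> nlinarith
        simp only [hx]
        by_cases hone : n = 1
        · subst hone
          rw [greedyLoop_nonpos _ _ _ (by omega)]
          simp [hmz]
        · have hpos' : 0 < n - 1 := by omega
          have hq' : PySem.Int.floordiv (s - q) (n - 1) = q := by
            rw [PySem.Int.floordiv_eq_iff_of_pos hpos']
            constructor <;> nlinarith
          have hm' : PySem.Int.mod (s - q) (n - 1) = 0 := by
            have := PySem.Int.floordiv_mul_add_mod (s - q) (n - 1)
            rw [hq'] at this
            nlinarith
          rw [ih (n - 1) (s - q) (acc ++ [q]) (by omega) hpos', hq', hm', hmz]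
          have h2 : (n - 0).toNat = (n - 1 - 0).toNat + 1 := by omega
          rw [h2, List.replicate_succ]
          simp
      · -- x = q + 1 ; remaining: quotient q, remainder m - 1 ; here n ≥ 2
        have hn2 : 2 ≤ n := by omega
        have hm1 : 1 ≤ m := by omega
        have hx : -(PySem.Int.floordiv (-s) n) = q + 1 := by
          rw [PySem.Int.neg_floordiv_neg_eq_iff_of_pos hpos]
          constructor <;> nlinarith
        simp only [hx]
        have hpos' : 0 < n - 1 := by omega
        have hq' : PySem.Int.floordiv (s - (q + 1)) (n - 1) = q := by
          rw [PySem.Int.floordiv_eq_iff_of_pos hpos']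
          constructor <;> nlinarith
        have hm' : PySem.Int.mod (s - (q + 1)) (n - 1) = m - 1 := by
          have := PySem.Int.floordiv_mul_add_mod (s - (q + 1)) (n - 1)
          rw [hq'] at this
          nlinarith
        rw [ih (n - 1) (s - (q + 1)) (acc ++ [q + 1]) (by omega) hpos', hq', hm']
        have h1 : n - 1 - (m - 1) = n - m := by ring
        have h2 : m.toNat = (m - 1).toNat + 1 := by omega
        rw [h1, h2, List.replicate_succ]
        simp

theorem solution_eq_alt (n s : Int) (hpre : Pre_solution n s) :
    solution n s = solution_alt n s := by
  unfold solution_alt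
  by_cases hns : n > s
  · unfold solution; simp [hns]
  · rcases lt_trichotomy n 0 with hneg | h0 | hpos
    · -- n < 0 : both sides are []
      have hb := PySem.Int.mod_neg_bounds s hneg
      unfold solution
      simp only [if_neg hns]
      rw [foldl_append_const, PySem.List.length_pyRange_one,
        greedyLoop_nonpos _ _ _ (by omega)]
      have h1 : (n - 0).toNat = 0 := by omega
      rw [h1]
      by_cases hmz : PySem.Int.mod s n ≠ 0 <;>
        simp [hmz, solutionIncLoop, PySem.List.sorted]
    · exfalso
      rcases hpre with h | h
      · exact h h0
      · omega
    · rw [solution_canon n s hpos hns,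
        greedyLoop_desc n.toNat n s [] rfl hpos, if_neg hns,
        List.nil_append, List.reverse_append]
      simp

-- ===== VERDICT (by name: the statement is the Claim_ definition above) =====
theorem solution_spec : Claim_equal_solution := by
  intro n s _ hpre
  unfold Spec_solution
  exact solution_eq_alt n s hpre
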